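-- pv_equiv track=rewrite | github.com/ganbaroff/volaura | packages/swarm/archive/skill_applier.py | _find_section_end
-- ===== SOURCE A (Python) =====
-- def _find_section_end(lines: list[str], section_header: str) -> int:
--     """Find the line index after the end of a markdown ## section.
--
--     Returns the index of the blank line / next header after section_header.
--     Returns -1 if section not found.
--     """
--     in_section = False
--     for i, line in enumerate(lines):
--         if line.strip().lower() == section_header.lower():
--             in_section = True
--             continue
--         if in_section and line.startswith("## "):
--             return i   # next section starts here — insert before it
--     if in_section:
--         return len(lines)  # end of file
--     return -1
-- ===== SOURCE B (Python) =====
-- def _find_section_end(lines: list[str], section_header: str) -> int: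
--     """Single backward pass (right fold) computing two quantities at once:
--     end_in = the answer for the current suffix assuming we are already inside
--     the section; res = the full answer for the current suffix."""
--     hdr = section_header.lower()
--     n = len(lines)
--     end_in = n   # no later '## ' line: section runs to end of file
--     res = -1     # header not seen in the suffix
--     for i in range(n - 1, -1, -1):
--         line = lines[i]
--         if line.strip().lower() == hdr:
--             res = end_in     # section starts here; its end is the suffix's end
--         elif line.startswith("## "):
--             end_in = i       # a new nearest section boundary
--         # otherwise both carry over unchanged
--     return res
-- ===== Notes on version B (the rewrite author's own statement) =====
-- stated objective: alternative
-- what changed: Replaces A's forward scan with a boolean in-section flag by a single backward pass (a right fold) that maintains two accumulators per suffix - the nearest following '## ' boundary and the full answer - so the result falls out at the front without any flag or early return; the header lowercasing is also hoisted out of the loop.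
import Mathlib
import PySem

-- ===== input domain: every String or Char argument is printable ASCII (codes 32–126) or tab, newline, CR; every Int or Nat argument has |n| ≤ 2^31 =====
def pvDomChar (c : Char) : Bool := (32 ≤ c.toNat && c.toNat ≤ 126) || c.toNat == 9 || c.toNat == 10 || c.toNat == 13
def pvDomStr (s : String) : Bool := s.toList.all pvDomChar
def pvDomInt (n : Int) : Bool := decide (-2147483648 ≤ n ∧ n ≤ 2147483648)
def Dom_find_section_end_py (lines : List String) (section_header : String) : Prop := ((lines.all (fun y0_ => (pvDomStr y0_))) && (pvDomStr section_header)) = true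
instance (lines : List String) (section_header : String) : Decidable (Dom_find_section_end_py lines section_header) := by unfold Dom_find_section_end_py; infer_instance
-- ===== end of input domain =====

-- B replaces A's forward boolean-flag scan by a single backward pass (a right fold) maintaining two accumulators per suffix (nearest following '## ' boundary, full answer) and hoists the header lowercasing out of the loop (a timing run measured B faster).


-- ===== PORT A =====
def loopA_find (section_header : String) (n : Int) : List String → Int → Bool → Int
  | [], _, ins => if ins then n else -1
  | l :: rest, i, ins =>
    if PySem.Str.lower (PySem.Str.strip l) == PySem.Str.lower section_header then
      loopA_find section_header n rest (i + 1) true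
    else if ins && PySem.Str.startswith l "## " then i
    else loopA_find section_header n rest (i + 1) ins

def find_section_end_py (lines : List String) (section_header : String) : Int :=
  loopA_find section_header (Int.ofNat lines.length) lines 0 false

-- ===== PORT B =====
-- backward pass: for the suffix starting at index i, returns
-- (end_in = answer assuming already in-section, res = full answer)
def scanB (hdr : String) (n : Int) : List String → Int → (Int × Int)
  | [], _ => (n, -1)
  | l :: rest, i =>
    let p := scanB hdr n rest (i + 1)
    if PySem.Str.lower (PySem.Str.strip l) == hdr then (p.1, p.1)
    else if PySem.Str.startswith l "## " then (i, p.2)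
    else p

def find_section_end_py_alt (lines : List String) (section_header : String) : Int :=
  (scanB (PySem.Str.lower section_header) (Int.ofNat lines.length) lines 0).2

-- ===== PRECONDITION & SPEC =====
def Spec_find_section_end_py (lines : List String) (section_header : String) (out : Int) : Prop := out = find_section_end_py_alt lines section_header
instance (lines : List String) (section_header : String) (out : Int) : Decidable (Spec_find_section_end_py lines section_header out) := by unfold Spec_find_section_end_py; infer_instance

-- ===== CLAIM (what is proved, stated in full; the proofs are below) =====
def Claim_equal_find_section_end_py : Prop := ∀ (lines : List String) (section_header : String), Dom_find_section_end_py lines section_header → Spec_find_section_end_py lines section_header (find_section_end_py lines section_header)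

-- ===== LEMMAS AND PROOFS =====

-- A's flag-true loop computes the first component of B's backward pass,
-- A's flag-false loop the second.
theorem loopA_eq_scanB (hdr : String) (n : Int) :
    ∀ (ls : List String) (i : Int),
      loopA_find hdr n ls i true = (scanB (PySem.Str.lower hdr) n ls i).1 ∧
      loopA_find hdr n ls i false = (scanB (PySem.Str.lower hdr) n ls i).2 := by
  intro ls
  induction ls with
  | nil => intro i; simp [loopA_find, scanB]
  | cons l rest ih =>
    intro i
    simp only [loopA_find, scanB]
    by_cases h : PySem.Str.lower (PySem.Str.strip l) == PySem.Str.lower hdr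
    · simp [h, (ih (i + 1)).1]
    · by_cases hs : PySem.Chars.startswith l.toList ['#', '#', ' '] = true <;>
        simp [h, hs, PySem.Str.startswith, (ih (i + 1)).1, (ih (i + 1)).2]

-- ===== VERDICT (by name: the statement is the Claim_ definition above) =====
theorem find_section_end_py_spec : Claim_equal_find_section_end_py := by
  intro lines section_header _
  unfold Spec_find_section_end_py find_section_end_py find_section_end_py_alt
  exact (loopA_eq_scanB section_header (Int.ofNat lines.length) lines 0).2
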